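-- pv_equiv track=rewrite | github.com/Geunuk/n-queen | puzzle_util.py | count_attack_ranged
-- ===== SOURCE A (Python) =====
-- def test_flag(i, u, r, d, l, go_flag):
--     if go_flag[0] == 1 and i > u:
--         go_flag[0] = 0
--     if go_flag[1] == 1 and i > r:
--         go_flag[1] = 0
--     if go_flag[2] == 1 and i > d:
--         go_flag[2] = 0
--     if go_flag[3] == 1 and i > l:
--         go_flag[3] = 0
--
-- def count_attack_ranged(x, n, l, r, N):
--     go_flag = [1]*4
--     m = x[n]
--
--     result = 0
--     for i in range(1, max(m, r-n, N-1-m, n-l)+1):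
--         test_flag(i, m, r-n, N-1-m, n-l, go_flag)
--         if go_flag[0] and go_flag[1] and x[n+i] == m-i:
--             result += 1
--         if go_flag[1] and x[n+i] == m:
--             result += 1
--         if go_flag[1] and go_flag[2] and x[n+i] == m+i:
--             result += 1
--         if go_flag[2] and go_flag[3] and x[n-i] == m+i:
--             result += 1
--         if go_flag[3] and x[n-i] == m:
--             result += 1
--         if go_flag[3] and go_flag[0] and x[n-i] == m-i:
--             result += 1
--     return result
-- ===== SOURCE B (Python) =====
-- def count_attack_ranged(x, n, l, r, N):
--     m = x[n]
--     up = m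
--     down = N - 1 - m
--     result = 0
--     for i in range(1, max(r - n, 0) + 1):
--         v = x[n + i]
--         if v == m:
--             result += 1
--         if v == m - i and i <= up:
--             result += 1
--         if v == m + i and i <= down:
--             result += 1
--     for i in range(1, max(n - l, 0) + 1):
--         v = x[n - i]
--         if v == m:
--             result += 1
--         if v == m + i and i <= down:
--             result += 1
--         if v == m - i and i <= up:
--             result += 1
--     return result
-- ===== Notes on version B (the rewrite author's own statement) =====
-- stated objective: simpler
-- what changed: B drops A's mutable go_flag state and its single loop running to max(m, r-n, N-1-m, n-l): it precomputes the direction bounds and runs two plainly bounded passes (right cells 1..r-n, then left cells 1..n-l) with explicit i<=bound comparisons, examining exactly the same cells.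
import Mathlib
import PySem

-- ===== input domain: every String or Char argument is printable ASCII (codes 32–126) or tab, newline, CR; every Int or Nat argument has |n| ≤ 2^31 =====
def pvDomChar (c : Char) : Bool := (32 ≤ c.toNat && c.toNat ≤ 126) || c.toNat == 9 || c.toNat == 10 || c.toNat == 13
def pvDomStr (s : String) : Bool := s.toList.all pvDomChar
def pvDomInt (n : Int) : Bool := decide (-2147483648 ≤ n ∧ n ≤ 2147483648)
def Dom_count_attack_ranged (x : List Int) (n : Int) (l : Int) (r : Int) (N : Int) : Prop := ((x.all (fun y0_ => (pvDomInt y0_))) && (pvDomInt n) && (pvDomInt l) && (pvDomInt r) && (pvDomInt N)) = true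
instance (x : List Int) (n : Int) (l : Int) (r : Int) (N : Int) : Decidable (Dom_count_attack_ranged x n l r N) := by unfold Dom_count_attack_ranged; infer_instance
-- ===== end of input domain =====

-- B replaces A's single flag-driven loop over max(m, r-n, N-1-m, n-l) cells by two plainly
-- bounded passes (right side, then left side) with explicit `i ≤ bound` comparisons — simpler:
-- no mutable flag list, and exactly the same cells are examined.

-- ===== PORT A =====
-- literal transliteration of Python `test_flag` (the go_flag list becomes a 4-tuple)
def test_flag (i u r d l : Int) (g : Int × Int × Int × Int) : Int × Int × Int × Int :=
  let g0 := if g.1 = 1 ∧ i > u then 0 else g.1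
  let g1 := if g.2.1 = 1 ∧ i > r then 0 else g.2.1
  let g2 := if g.2.2.1 = 1 ∧ i > d then 0 else g.2.2.1
  let g3 := if g.2.2.2 = 1 ∧ i > l then 0 else g.2.2.2
  (g0, g1, g2, g3)

-- the body of A's for-loop (state = (go_flag, result)); x[j] is PySem.List.pyGetD (in range under Pre_)
def stepA (x : List Int) (n m R d L : Int) (s : (Int × Int × Int × Int) × Int) (i : Int) :
    (Int × Int × Int × Int) × Int :=
  let g := test_flag i m R d L s.1
  let res := s.2
  let res := if g.1 ≠ 0 ∧ g.2.1 ≠ 0 ∧ PySem.List.pyGetD x (n + i) 0 = m - i then res + 1 else res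
  let res := if g.2.1 ≠ 0 ∧ PySem.List.pyGetD x (n + i) 0 = m then res + 1 else res
  let res := if g.2.1 ≠ 0 ∧ g.2.2.1 ≠ 0 ∧ PySem.List.pyGetD x (n + i) 0 = m + i then res + 1 else res
  let res := if g.2.2.1 ≠ 0 ∧ g.2.2.2 ≠ 0 ∧ PySem.List.pyGetD x (n - i) 0 = m + i then res + 1 else res
  let res := if g.2.2.2 ≠ 0 ∧ PySem.List.pyGetD x (n - i) 0 = m then res + 1 else res
  let res := if g.2.2.2 ≠ 0 ∧ g.1 ≠ 0 ∧ PySem.List.pyGetD x (n - i) 0 = m - i then res + 1 else res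
  (g, res)

def count_attack_ranged (x : List Int) (n : Int) (l : Int) (r : Int) (N : Int) : Int :=
  let m := PySem.List.pyGetD x n 0
  ((PySem.List.pyRange 1 (max (max (max m (r - n)) (N - 1 - m)) (n - l) + 1) 1).foldl
      (stepA x n m (r - n) (N - 1 - m) (n - l)) ((1, 1, 1, 1), 0)).2

-- ===== PORT B =====
-- body of B's right-side pass (up = m, d = N-1-m)
def stepBR (x : List Int) (n m d : Int) (res i : Int) : Int :=
  let v := PySem.List.pyGetD x (n + i) 0
  let res := if v = m then res + 1 else res
  let res := if v = m - i ∧ i ≤ m then res + 1 else res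
  if v = m + i ∧ i ≤ d then res + 1 else res

-- body of B's left-side pass
def stepBL (x : List Int) (n m d : Int) (res i : Int) : Int :=
  let v := PySem.List.pyGetD x (n - i) 0
  let res := if v = m then res + 1 else res
  let res := if v = m + i ∧ i ≤ d then res + 1 else res
  if v = m - i ∧ i ≤ m then res + 1 else res

def count_attack_ranged_alt (x : List Int) (n : Int) (l : Int) (r : Int) (N : Int) : Int :=
  let m := PySem.List.pyGetD x n 0
  let down := N - 1 - m
  let res1 := (PySem.List.pyRange 1 (max (r - n) 0 + 1) 1).foldl (stepBR x n m down) 0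
  (PySem.List.pyRange 1 (max (n - l) 0 + 1) 1).foldl (stepBL x n m down) res1

-- ===== PRECONDITION & SPEC =====
-- Pre_ excludes exactly the inputs where Python A raises IndexError: x[n] itself, or (when the
-- right/left passes are non-empty) an access x[n+i] / x[n-i] past a list end.
def Pre_count_attack_ranged (x : List Int) (n : Int) (l : Int) (r : Int) (N : Int) : Prop :=
  PySem.Raise.InRange x.length n ∧ (r ≤ n ∨ r < (x.length : Int)) ∧ (n ≤ l ∨ -(x.length : Int) ≤ l)
instance (x : List Int) (n : Int) (l : Int) (r : Int) (N : Int) : Decidable (Pre_count_attack_ranged x n l r N) := by unfold Pre_count_attack_ranged; infer_instance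

def pvWitness_count_attack_ranged : List Int × Int × Int × Int × Int := ([0, 2, 1], 1, 0, 2, 3)

def Spec_count_attack_ranged (x : List Int) (n : Int) (l : Int) (r : Int) (N : Int) (out : Int) : Prop := out = count_attack_ranged_alt x n l r N
instance (x : List Int) (n : Int) (l : Int) (r : Int) (N : Int) (out : Int) : Decidable (Spec_count_attack_ranged x n l r N out) := by unfold Spec_count_attack_ranged; infer_instance

-- ===== CLAIM (what is proved, stated in full; the proofs are below) =====
def Claim_equal_count_attack_ranged : Prop := ∀ (x : List Int) (n : Int) (l : Int) (r : Int) (N : Int), Dom_count_attack_ranged x n l r N → Pre_count_attack_ranged x n l r N → Spec_count_attack_ranged x n l r N (count_attack_ranged x n l r N)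

-- ===== LEMMAS AND PROOFS =====

-- flag value after the i-th call of test_flag, for a bound b
def flagF (b i : Int) : Int := if i ≤ b then 1 else 0

-- invariant on one flag entering step i: still the initial 1, or already the settled value
def okF (b j g : Int) : Prop := g = 1 ∨ g = flagF b j

-- contribution of iteration i of A's loop, with the flags replaced by their values
def cA (x : List Int) (n m R d L : Int) (i : Int) : Int :=
  (if i ≤ m ∧ i ≤ R ∧ PySem.List.pyGetD x (n + i) 0 = m - i then 1 else 0) +
  (if i ≤ R ∧ PySem.List.pyGetD x (n + i) 0 = m then 1 else 0) +
  (if i ≤ R ∧ i ≤ d ∧ PySem.List.pyGetD x (n + i) 0 = m + i then 1 else 0) +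
  (if i ≤ d ∧ i ≤ L ∧ PySem.List.pyGetD x (n - i) 0 = m + i then 1 else 0) +
  (if i ≤ L ∧ PySem.List.pyGetD x (n - i) 0 = m then 1 else 0) +
  (if i ≤ L ∧ i ≤ m ∧ PySem.List.pyGetD x (n - i) 0 = m - i then 1 else 0)

-- per-iteration contribution of B's two passes
def cBR (x : List Int) (n m d : Int) (i : Int) : Int :=
  (if PySem.List.pyGetD x (n + i) 0 = m then 1 else 0) +
  (if PySem.List.pyGetD x (n + i) 0 = m - i ∧ i ≤ m then 1 else 0) +
  (if PySem.List.pyGetD x (n + i) 0 = m + i ∧ i ≤ d then 1 else 0)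

def cBL (x : List Int) (n m d : Int) (i : Int) : Int :=
  (if PySem.List.pyGetD x (n - i) 0 = m then 1 else 0) +
  (if PySem.List.pyGetD x (n - i) 0 = m + i ∧ i ≤ d then 1 else 0) +
  (if PySem.List.pyGetD x (n - i) 0 = m - i ∧ i ≤ m then 1 else 0)

lemma flagF_ne (b i : Int) : flagF b i ≠ 0 ↔ i ≤ b := by
  unfold flagF; split_ifs <;> simp_all

lemma tfc (i b g : Int) (h : okF b (i - 1) g) :
    (if g = 1 ∧ i > b then 0 else g) = flagF b i := by
  rcases h with h | h <;> subst h <;> unfold flagF <;>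
    by_cases h1 : i - 1 ≤ b <;> by_cases h2 : i ≤ b <;> simp [h1, h2] <;> omega

lemma stepA_eq (x : List Int) (n m R d L : Int) (g : Int × Int × Int × Int) (res i : Int)
    (h0 : okF m (i - 1) g.1) (h1 : okF R (i - 1) g.2.1)
    (h2 : okF d (i - 1) g.2.2.1) (h3 : okF L (i - 1) g.2.2.2) :
    stepA x n m R d L (g, res) i =
      ((flagF m i, flagF R i, flagF d i, flagF L i), res + cA x n m R d L i) := by
  obtain ⟨a, b, c, e⟩ := g
  simp only [stepA, test_flag]
  rw [tfc i m a h0, tfc i R b h1, tfc i d c h2, tfc i L e h3]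
  refine Prod.ext rfl ?_
  simp only [cA, flagF_ne]
  split_ifs <;> omega

lemma okF_flagF (b i : Int) : okF b ((i + 1) - 1) (flagF b i) := by
  simp [okF]

lemma pyRange_shift (M : Int) :
    PySem.List.pyRange 1 (M + 1) 1 = PySem.List.pyRange 1 (1 + (M.toNat : Int)) 1 := by
  have h : (M + 1 - 1).toNat = (1 + (M.toNat : Int) - 1).toNat := by omega
  rw [PySem.List.pyRange_one, PySem.List.pyRange_one, h]

set_option maxHeartbeats 1000000 in
lemma loopA (x : List Int) (n m R d L : Int) : ∀ (k : Nat) (a res : Int) (g : Int × Int × Int × Int),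
    okF m (a - 1) g.1 → okF R (a - 1) g.2.1 → okF d (a - 1) g.2.2.1 → okF L (a - 1) g.2.2.2 →
    ((PySem.List.pyRange a (a + (k : Int)) 1).foldl (stepA x n m R d L) (g, res)).2 =
      res + ((PySem.List.pyRange a (a + (k : Int)) 1).map (cA x n m R d L)).sum := by
  intro k
  induction k with
  | zero =>
    intro a res g _ _ _ _
    rw [PySem.List.pyRange_one_eq_nil (by omega : a + ((0 : Nat) : Int) ≤ a)]
    simp
  | succ k ih =>
    intro a res g h0 h1 h2 h3
    rw [PySem.List.pyRange_one_cons (by push_cast; omega : a < a + ((k+1:Nat):Int))]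
    simp only [List.foldl_cons, List.map_cons, List.sum_cons]
    rw [stepA_eq x n m R d L g res a h0 h1 h2 h3]
    have : a + ((k + 1 : Nat) : Int) = (a + 1) + (k : Int) := by push_cast; omega
    rw [this, ih (a + 1) (res + cA x n m R d L a) _
      (okF_flagF m a) (okF_flagF R a) (okF_flagF d a) (okF_flagF L a)]
    ring

-- the whole of A as a sum over its range
set_option maxHeartbeats 1000000 in
lemma A_as_sum (x : List Int) (n l r N : Int) :
    count_attack_ranged x n l r N =
      ((PySem.List.pyRange 1 (max (max (max (PySem.List.pyGetD x n 0) (r - n)) (N - 1 - (PySem.List.pyGetD x n 0))) (n - l) + 1) 1).map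
        (cA x n (PySem.List.pyGetD x n 0) (r - n) (N - 1 - (PySem.List.pyGetD x n 0)) (n - l))).sum := by
  simp only [count_attack_ranged]
  rw [pyRange_shift]
  rw [loopA x n (PySem.List.pyGetD x n 0) (r - n) (N - 1 - (PySem.List.pyGetD x n 0)) (n - l)
    (max (max (max (PySem.List.pyGetD x n 0) (r - n)) (N - 1 - (PySem.List.pyGetD x n 0))) (n - l)).toNat
    1 0 ((1, 1, 1, 1)) (Or.inl rfl) (Or.inl rfl) (Or.inl rfl) (Or.inl rfl)]
  rw [← pyRange_shift]
  ring

-- B's pass bodies as plain additions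
lemma stepBR_eq (x : List Int) (n m d res i : Int) :
    stepBR x n m d res i = res + cBR x n m d i := by
  simp only [stepBR, cBR]; split_ifs <;> omega

lemma stepBL_eq (x : List Int) (n m d res i : Int) :
    stepBL x n m d res i = res + cBL x n m d i := by
  simp only [stepBL, cBL]; split_ifs <;> omega

-- pointwise: A's contribution is B's two guarded contributions
lemma ite3 (P Q E : Prop) [Decidable P] [Decidable Q] [Decidable E] :
    (if P ∧ Q ∧ E then (1 : Int) else 0) = if Q then (if E ∧ P then (1 : Int) else 0) else 0 := by
  split_ifs <;> simp_all

lemma ite3b (Q P E : Prop) [Decidable P] [Decidable Q] [Decidable E] :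
    (if Q ∧ P ∧ E then (1 : Int) else 0) = if Q then (if E ∧ P then (1 : Int) else 0) else 0 := by
  split_ifs <;> simp_all

lemma ite2 (Q E : Prop) [Decidable Q] [Decidable E] :
    (if Q ∧ E then (1 : Int) else 0) = if Q then (if E then (1 : Int) else 0) else 0 := by
  split_ifs <;> simp_all

lemma dist3 (Q : Prop) [Decidable Q] (a b c : Int) :
    (if Q then a + b + c else 0) = (if Q then a else 0) + (if Q then b else 0) + (if Q then c else 0) := by
  split_ifs <;> ring

lemma cA_split (x : List Int) (n m R d L i : Int) :
    cA x n m R d L i =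
      (if i ≤ R then cBR x n m d i else 0) + (if i ≤ L then cBL x n m d i else 0) := by
  simp only [cA, cBR, cBL]
  rw [ite3 (i ≤ m) (i ≤ R) (PySem.List.pyGetD x (n + i) 0 = m - i),
      ite2 (i ≤ R) (PySem.List.pyGetD x (n + i) 0 = m),
      ite3b (i ≤ R) (i ≤ d) (PySem.List.pyGetD x (n + i) 0 = m + i),
      ite3 (i ≤ d) (i ≤ L) (PySem.List.pyGetD x (n - i) 0 = m + i),
      ite2 (i ≤ L) (PySem.List.pyGetD x (n - i) 0 = m),
      ite3b (i ≤ L) (i ≤ m) (PySem.List.pyGetD x (n - i) 0 = m - i),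
      dist3, dist3]
  ring

-- a guarded sum over the big range collapses to the clamped range
lemma guard_sum (M R : Int) (c : Int → Int) (hRM : R ≤ M) :
    ((PySem.List.pyRange 1 (M + 1) 1).map (fun i => if i ≤ R then c i else 0)).sum =
      ((PySem.List.pyRange 1 (max R 0 + 1) 1).map c).sum := by
  by_cases hM : M ≤ 0
  · have h1 : PySem.List.pyRange 1 (M + 1) 1 = [] := PySem.List.pyRange_one_eq_nil (by omega)
    have h2 : PySem.List.pyRange 1 (max R 0 + 1) 1 = [] := PySem.List.pyRange_one_eq_nil (by omega)
    simp [h1, h2]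
  · rw [PySem.List.pyRange_one_append 1 (max R 0 + 1) (M + 1) (by omega) (by omega)]
    rw [List.map_append, List.sum_append]
    have hfst : ((PySem.List.pyRange 1 (max R 0 + 1) 1).map (fun i => if i ≤ R then c i else 0)) =
        ((PySem.List.pyRange 1 (max R 0 + 1) 1).map c) := by
      apply List.map_congr_left
      intro i hi
      rw [PySem.List.mem_pyRange_one] at hi
      rw [if_pos (by omega)]
    have hsnd : ((PySem.List.pyRange (max R 0 + 1) (M + 1) 1).map (fun i => if i ≤ R then c i else 0)).sum = 0 := by
      have : ((PySem.List.pyRange (max R 0 + 1) (M + 1) 1).map (fun i => if i ≤ R then c i else 0)) =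
          ((PySem.List.pyRange (max R 0 + 1) (M + 1) 1).map (fun _ => (0 : Int))) := by
        apply List.map_congr_left
        intro i hi
        rw [PySem.List.mem_pyRange_one] at hi
        rw [if_neg (by omega)]
      rw [this]
      simp
    rw [hfst, hsnd, add_zero]

-- ===== VERDICT (by name: the statement is the Claim_ definition above) =====
set_option maxHeartbeats 1000000 in
theorem count_attack_ranged_spec : Claim_equal_count_attack_ranged := by
  intro x n l r N _ _
  unfold Spec_count_attack_ranged
  rw [A_as_sum]
  simp only [count_attack_ranged_alt]
  set m := PySem.List.pyGetD x n 0 with hm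
  set R := r - n with hR
  set d := N - 1 - m with hd
  set L := n - l with hL
  set M := max (max (max m R) d) L with hM
  have hRM : R ≤ M := (le_max_right m R).trans ((le_max_left _ d).trans (le_max_left _ L))
  have hLM : L ≤ M := le_max_right _ L
  have hsplit : ((PySem.List.pyRange 1 (M + 1) 1).map (cA x n m R d L)).sum =
      ((PySem.List.pyRange 1 (M + 1) 1).map (fun i => if i ≤ R then cBR x n m d i else 0)).sum +
      ((PySem.List.pyRange 1 (M + 1) 1).map (fun i => if i ≤ L then cBL x n m d i else 0)).sum := by
    rw [← PySem.List.sum_map_add_int]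
    apply congrArg
    apply List.map_congr_left
    intro i _
    exact cA_split x n m R d L i
  rw [hsplit, guard_sum M R _ hRM, guard_sum M L _ hLM]
  have hbr : ∀ (init : Int) (xs : List Int), xs.foldl (stepBR x n m d) init = init + (xs.map (cBR x n m d)).sum := by
    intro init xs
    rw [PySem.List.foldl_congr_mem xs (stepBR x n m d) (fun acc i => acc + cBR x n m d i) init
      (fun acc i _ => stepBR_eq x n m d acc i), PySem.List.foldl_add]
  have hbl : ∀ (init : Int) (xs : List Int), xs.foldl (stepBL x n m d) init = init + (xs.map (cBL x n m d)).sum := by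
    intro init xs
    rw [PySem.List.foldl_congr_mem xs (stepBL x n m d) (fun acc i => acc + cBL x n m d i) init
      (fun acc i _ => stepBL_eq x n m d acc i), PySem.List.foldl_add]
  rw [hbr, hbl]
  ring
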